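-- pv_equiv track=rewrite | github.com/batzlerg/jetson-vfd-artist | code_metrics.py | _detect_character_families
-- ===== SOURCE A (Python) =====
-- from typing import Dict, Set, List
--
-- def _detect_character_families(chars: Set[str]) -> List[str]:
--     """Categorize characters into visual families"""
--     families = {
--         'rotational': set('|/-\\<^>v'),
--         'density': set('.oO@*#%+'),
--         'organic': set('.oO*~-'),
--         'structural': set('[](){}=_'),
--         'arrows': set('<>^v'),
--     }
--
--     detected = []
--     for name, family_chars in families.items():
--         if chars & family_chars:
--             detected.append(name)
--
--     return detected
-- ===== SOURCE B (Python) =====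
-- # B: inverted index char -> family names, single pass over the input chars.
-- def _detect_character_families(chars):
--     order = ['rotational', 'density', 'organic', 'structural', 'arrows']
--     family_strings = {
--         'rotational': '|/-\\<^>v',
--         'density': '.oO@*#%+',
--         'organic': '.oO*~-',
--         'structural': '[](){}=_',
--         'arrows': '<>^v',
--     }
--     index = {}
--     for name in order:
--         for ch in family_strings[name]:
--             index.setdefault(ch, []).append(name)
--     seen = set()
--     for c in chars:
--         seen.update(index.get(c, ()))
--     return [name for name in order if name in seen]
-- ===== Notes on version B (the rewrite author's own statement) =====
-- stated objective: alternative
-- what changed: Replaces A's loop over the five families with a per-family set intersection by a precomputed inverted index (char -> family names), a single pass over the input chars unioning hit names into a seen-set, and a final filter of the canonical family order.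
import Mathlib
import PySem

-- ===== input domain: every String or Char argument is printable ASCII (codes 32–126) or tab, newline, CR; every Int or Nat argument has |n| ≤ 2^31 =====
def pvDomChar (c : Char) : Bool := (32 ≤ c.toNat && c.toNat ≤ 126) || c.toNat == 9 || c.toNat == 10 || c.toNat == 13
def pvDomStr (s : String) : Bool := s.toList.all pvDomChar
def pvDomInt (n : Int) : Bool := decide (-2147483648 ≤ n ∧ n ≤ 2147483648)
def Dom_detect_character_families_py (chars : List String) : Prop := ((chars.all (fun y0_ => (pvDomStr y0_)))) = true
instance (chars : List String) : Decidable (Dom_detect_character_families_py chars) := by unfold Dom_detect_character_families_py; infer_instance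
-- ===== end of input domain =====

-- B replaces A's per-family set intersections by an inverted index
-- (char -> family names) and a single pass over the input chars (objective: alternative).
-- The input Python set 'chars' is modelled as a List String of its distinct elements.

-- ===== PORT A =====
-- A: iterate over the five families in dict-insertion order, append the family
-- name when the intersection with chars is nonempty (Python truthiness of a set).
def pvFamiliesA : List (String × PySem.Set String) :=
  [("rotational", PySem.Set.ofList ["|", "/", "-", "\\", "<", "^", ">", "v"]),
   ("density",    PySem.Set.ofList [".", "o", "O", "@", "*", "#", "%", "+"]),
   ("organic",    PySem.Set.ofList [".", "o", "O", "*", "~", "-"]),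
   ("structural", PySem.Set.ofList ["[", "]", "(", ")", "{", "}", "=", "_"]),
   ("arrows",     PySem.Set.ofList ["<", ">", "^", "v"])]

def detect_character_families_py (chars : List String) : List String :=
  pvFamiliesA.foldl
    (fun detected nf =>
      if PySem.Set.inter chars nf.2 ≠ [] then detected ++ [nf.1] else detected)
    []

-- ===== PORT B =====
-- B: build an inverted index char -> list of family names, one pass over the
-- input chars unioning the hit family names into 'seen', then keep the names of
-- the canonical order that are in 'seen'.
def pvOrderB : List String := ["rotational", "density", "organic", "structural", "arrows"]

def pvFamilyStringsB : PySem.Dict String String :=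
  PySem.Dict.ofList
    [("rotational", "|/-\\<^>v"), ("density", ".oO@*#%+"), ("organic", ".oO*~-"),
     ("structural", "[](){}=_"), ("arrows", "<>^v")]

-- index.setdefault(ch, []).append(name)  ==  index[ch] = index.get(ch, []) + [name]
def pvIndexB : PySem.Dict String (List String) :=
  pvOrderB.foldl
    (fun idx name =>
      (PySem.Dict.getD pvFamilyStringsB name "").toList.foldl
        (fun idx ch => idx.modify ch.toString [] (fun l => l ++ [name])) idx)
    PySem.Dict.empty

def detect_character_families_py_alt (chars : List String) : List String :=
  let seen : PySem.Set String :=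
    chars.foldl (fun s c => PySem.Set.update s (PySem.Dict.getD pvIndexB c [])) PySem.Set.empty
  pvOrderB.filter (fun name => PySem.Set.contains seen name)

-- ===== PRECONDITION & SPEC =====
def Spec_detect_character_families_py (chars : List String) (out : List String) : Prop := out = detect_character_families_py_alt chars
instance (chars : List String) (out : List String) : Decidable (Spec_detect_character_families_py chars out) := by unfold Spec_detect_character_families_py; infer_instance

-- ===== CLAIM (what is proved, stated in full; the proofs are below) =====
def Claim_equal_detect_character_families_py : Prop := ∀ (chars : List String), Dom_detect_character_families_py chars → Spec_detect_character_families_py chars (detect_character_families_py chars)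

-- ===== LEMMAS AND PROOFS =====

-- membership in the accumulated 'seen' set of B's main loop
theorem mem_seen_iff (chars : List String) (init : PySem.Set String) (n : String) :
    n ∈ chars.foldl (fun s c => PySem.Set.update s (PySem.Dict.getD pvIndexB c [])) init ↔
      n ∈ init ∨ ∃ c ∈ chars, n ∈ PySem.Dict.getD pvIndexB c [] := by
  induction chars generalizing init with
  | nil => simp
  | cons c rest ih =>
    rw [List.foldl_cons, ih]
    simp only [PySem.Set.mem_update, List.mem_cons]
    constructor
    · rintro ((h|h)|⟨x,hx,h⟩)
      · exact Or.inl h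
      · exact Or.inr ⟨c, Or.inl rfl, h⟩
      · exact Or.inr ⟨x, Or.inr hx, h⟩
    · rintro (h|⟨x,(rfl|hx),h⟩)
      · exact Or.inl (Or.inl h)
      · exact Or.inl (Or.inr h)
      · exact Or.inr ⟨x, hx, h⟩

-- the (char, family-name) pairs in the order B inserts them into the index
def pvPairs : List (String × String) := [("|", "rotational"), ("/", "rotational"), ("-", "rotational"), ("\\", "rotational"), ("<", "rotational"), ("^", "rotational"), (">", "rotational"), ("v", "rotational"), (".", "density"), ("o", "density"), ("O", "density"), ("@", "density"), ("*", "density"), ("#", "density"), ("%", "density"), ("+", "density"), (".", "organic"), ("o", "organic"), ("O", "organic"), ("*", "organic"), ("~", "organic"), ("-", "organic"), ("[", "structural"), ("]", "structural"), ("(", "structural"), (")", "structural"), ("{", "structural"), ("}", "structural"), ("=", "structural"), ("_", "structural"), ("<", "arrows"), (">", "arrows"), ("^", "arrows"), ("v", "arrows")]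

set_option maxRecDepth 8192 in
theorem index_eq_foldl_pairs :
    pvIndexB = pvPairs.foldl (fun d p => d.modify p.1 [] (fun l => l ++ [p.2])) PySem.Dict.empty := by
  rfl

theorem index_getD (c : String) :
    PySem.Dict.getD pvIndexB c [] = (pvPairs.filter (fun p => p.1 == c)).map (·.2) := by
  rw [index_eq_foldl_pairs, PySem.Dict.getD_foldl_modify_append]
  simp

-- per family name: the index lookup hits the name iff the char is in that family
theorem bridge (c : String) (nf : String × PySem.Set String) (hnf : nf ∈ pvFamiliesA) :
    (nf.1 ∈ PySem.Dict.getD pvIndexB c []) ↔ c ∈ nf.2 := by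
  rw [index_getD]
  fin_cases hnf <;> simp [pvPairs, PySem.Set.mem_ofList]

-- Prop-test variant of PySem.List.foldl_append_if
theorem foldl_append_ite {α β : Type} (p : α → Prop) [DecidablePred p] (f : α → β)
    (l : List α) (acc : List β) :
    l.foldl (fun acc x => if p x then acc ++ [f x] else acc) acc
      = acc ++ (l.filter (fun x => decide (p x))).map f := by
  induction l generalizing acc with
  | nil => simp
  | cons x xs ih =>
    rw [List.foldl_cons, ih, List.filter_cons]
    by_cases h : p x <;> simp [h]

-- A's append-loop as a filter-map over the family list
theorem detectA_eq_filter (chars : List String) :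
    detect_character_families_py chars =
      (pvFamiliesA.filter (fun nf => PySem.Set.inter chars nf.2 ≠ [])).map Prod.fst := by
  unfold detect_character_families_py
  rw [foldl_append_ite (fun nf => PySem.Set.inter chars nf.2 ≠ []) Prod.fst]
  simp

theorem detect_character_families_py_spec : Claim_equal_detect_character_families_py := by
  intro chars _
  unfold Spec_detect_character_families_py detect_character_families_py_alt
  rw [detectA_eq_filter]
  rw [show pvOrderB = pvFamiliesA.map Prod.fst from rfl, List.filter_map]
  congr 1
  apply List.filter_congr
  intro nf hnf
  simp only [Function.comp_apply]
  rw [Bool.eq_iff_iff]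
  simp only [decide_eq_true_eq, PySem.Set.contains_iff]
  rw [mem_seen_iff]
  constructor
  · intro h
    rcases List.exists_mem_of_ne_nil _ h with ⟨x, hx⟩
    rw [PySem.Set.mem_inter] at hx
    exact Or.inr ⟨x, hx.1, (bridge x nf hnf).mpr hx.2⟩
  · rintro (h|⟨x, hx, hmem⟩)
    · exact absurd h (by simp [PySem.Set.empty])
    intro hnil
    have hxm : x ∈ PySem.Set.inter chars nf.2 := by
      rw [PySem.Set.mem_inter]
      exact ⟨hx, (bridge x nf hnf).mp hmem⟩
    rw [hnil] at hxm
    exact absurd hxm (List.not_mem_nil)
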